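-- pv_equiv track=rewrite | github.com/ANTL-KJH/Python-CodingTest | 프로그래머스/0/181928. 이어 붙인 수/이어 붙인 수.py | solution
-- ===== SOURCE A (Python) =====
-- def solution(num_list):
--     odd, even=0,0
--     for i in num_list:
--         if i % 2 ==0:
--             even = even*10 + i
--         else:
--             odd = odd * 10 + i
--     answer = odd + even
--     return answer
-- ===== SOURCE B (Python) =====
-- from functools import reduce
--
-- def solution(num_list):
--     odds = [i for i in num_list if i % 2]
--     evens = [i for i in num_list if i % 2 == 0]
--     cat = lambda acc, x: acc * 10 + x
--     return reduce(cat, odds, 0) + reduce(cat, evens, 0)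
-- ===== Notes on version B (the rewrite author's own statement) =====
-- stated objective: idiomatic
-- what changed: Replaces the single loop with interleaved mutable accumulators by a partition of the list into odds/evens via comprehensions followed by two functools.reduce folds.
import Mathlib
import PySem

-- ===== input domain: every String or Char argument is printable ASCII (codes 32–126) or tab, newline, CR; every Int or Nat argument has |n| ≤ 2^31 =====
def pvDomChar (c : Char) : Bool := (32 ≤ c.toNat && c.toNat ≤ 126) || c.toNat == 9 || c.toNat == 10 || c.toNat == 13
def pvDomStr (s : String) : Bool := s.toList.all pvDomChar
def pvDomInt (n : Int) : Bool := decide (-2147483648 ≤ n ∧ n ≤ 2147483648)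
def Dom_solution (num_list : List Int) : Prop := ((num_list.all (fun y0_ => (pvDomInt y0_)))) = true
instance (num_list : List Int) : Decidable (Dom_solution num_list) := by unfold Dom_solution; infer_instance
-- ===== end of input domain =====

-- B replaces A's single loop with interleaved accumulators by partition-then-fold (idiomatic decomposition); same O(n) cost.


-- ===== PORT A =====
-- literal port of A: one loop over num_list carrying the pair (odd, even)
def solution (num_list : List Int) : Int :=
  let st := num_list.foldl (fun (p : Int × Int) i =>
    if PySem.Int.mod i 2 = 0 then (p.1, p.2 * 10 + i) else (p.1 * 10 + i, p.2)) (0, 0)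
  st.1 + st.2

-- ===== PORT B =====
-- port of B: partition into odds/evens, then fold each with acc*10+x
def solution_alt (num_list : List Int) : Int :=
  let odds := num_list.filter (fun i => PySem.Int.mod i 2 ≠ 0)
  let evens := num_list.filter (fun i => PySem.Int.mod i 2 = 0)
  odds.foldl (fun acc x => acc * 10 + x) 0 + evens.foldl (fun acc x => acc * 10 + x) 0

-- ===== PRECONDITION & SPEC =====
def Spec_solution (num_list : List Int) (out : Int) : Prop := out = solution_alt num_list
instance (num_list : List Int) (out : Int) : Decidable (Spec_solution num_list out) := by unfold Spec_solution; infer_instance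

-- ===== CLAIM (what is proved, stated in full; the proofs are below) =====
def Claim_equal_solution : Prop := ∀ (num_list : List Int), Dom_solution num_list → Spec_solution num_list (solution num_list)

-- ===== LEMMAS AND PROOFS =====
lemma solution_loop_inv (l : List Int) (o e : Int) :
    l.foldl (fun (p : Int × Int) i =>
      if PySem.Int.mod i 2 = 0 then (p.1, p.2 * 10 + i) else (p.1 * 10 + i, p.2)) (o, e) =
    ((l.filter (fun i => PySem.Int.mod i 2 ≠ 0)).foldl (fun acc x => acc * 10 + x) o,
     (l.filter (fun i => PySem.Int.mod i 2 = 0)).foldl (fun acc x => acc * 10 + x) e) := by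
  induction l generalizing o e with
  | nil => simp
  | cons a t ih =>
    rw [List.foldl_cons, List.filter_cons, List.filter_cons]
    by_cases h : PySem.Int.mod a 2 = 0
    · rw [if_pos h, ih]
      have h1 : (2 : Int) ∣ a := by simp [PySem.Int.mod, Int.fmod_eq_emod] at h; omega
      have h2 : ¬ (a % 2 = 1) := by omega
      simp [h1, h2]
    · rw [if_neg h, ih]
      have h1 : ¬ ((2 : Int) ∣ a) := by simp [PySem.Int.mod, Int.fmod_eq_emod] at h; omega
      have h2 : a % 2 = 1 := by omega
      simp [h1, h2]

-- ===== VERDICT (by name: the statement is the Claim_ definition above) =====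
theorem solution_spec : Claim_equal_solution := by
  intro l _
  unfold Spec_solution solution solution_alt
  rw [solution_loop_inv]
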